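-- pv_equiv track=rewrite | github.com/ikolokotronis/encryption-program | src/utils/rot47_encoder.py | rot47_encoder
-- ===== SOURCE A (Python) =====
-- def rot47_encoder(buffer):
--     x = []
--     for i in range(len(buffer)):
--         j = ord(buffer[i])
--         if 33 <= j <= 126:
--             x.append(chr(33 + ((j + 14) % 94)))
--         else:
--             x.append(buffer[i])
--     encrypted_text = ''.join(x)
--     return encrypted_text
-- ===== SOURCE B (Python) =====
-- ALPHABET = ''.join(map(chr, range(33, 127)))
-- ROTATED = ALPHABET[47:] + ALPHABET[:47]
--
--
-- def rot47_encoder(buffer):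
--     out = []
--     for c in buffer:
--         i = ALPHABET.find(c)
--         out.append(c if i < 0 else ROTATED[i])
--     return ''.join(out)
-- ===== Notes on version B (the rewrite author's own statement) =====
-- stated objective: alternative
-- what changed: B realizes ROT47 as a literal rotation of the explicit 94-character alphabet (ALPHABET[47:] + ALPHABET[:47]) and maps each character to the same position in the rotated alphabet via str.find, with no per-character ordinal arithmetic or modular formula; characters not found in the alphabet pass through unchanged.
import Mathlib
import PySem

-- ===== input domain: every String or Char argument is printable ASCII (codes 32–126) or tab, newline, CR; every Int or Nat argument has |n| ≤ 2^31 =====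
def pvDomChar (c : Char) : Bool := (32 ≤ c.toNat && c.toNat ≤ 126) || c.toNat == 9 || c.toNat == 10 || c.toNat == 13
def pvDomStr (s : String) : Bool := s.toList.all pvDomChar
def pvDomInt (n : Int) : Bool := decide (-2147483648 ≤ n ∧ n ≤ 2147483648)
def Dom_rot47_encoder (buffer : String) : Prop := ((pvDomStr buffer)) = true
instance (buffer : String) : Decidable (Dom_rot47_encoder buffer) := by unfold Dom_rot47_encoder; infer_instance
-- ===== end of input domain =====

-- B replaces A's per-character modular arithmetic by a rotation of the explicit
-- 94-character alphabet: each character found in the alphabet is replaced by the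
-- character at the same position in the rotated alphabet; others pass through.

-- ===== PORT A =====
def rot47_encoder (buffer : String) : String :=
  let cs := buffer.toList
  let x := (PySem.List.pyRange 0 (cs.length : Int) 1).foldl
    (fun acc i =>
      let c := PySem.List.pyGetD cs i ' '   -- index always in range in A's loop
      let j : Int := (c.toNat : Int)
      if 33 ≤ j ∧ j ≤ 126 then
        acc ++ [Char.ofNat (33 + ((j + 14) % 94)).toNat]
      else
        acc ++ [c]) []
  String.mk x

-- ===== PORT B =====
-- ALPHABET = ''.join(map(chr, range(33, 127)))
def rot47Alphabet : List Char := (PySem.List.pyRange 33 127 1).map (fun o => Char.ofNat o.toNat)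
-- ROTATED = ALPHABET[47:] + ALPHABET[:47]
def rot47Rotated : List Char :=
  PySem.List.slice rot47Alphabet (some 47) none ++ PySem.List.slice rot47Alphabet none (some 47)

def rot47_encoder_alt (buffer : String) : String :=
  String.mk (buffer.toList.foldl
    (fun out c =>
      let i := PySem.Chars.find rot47Alphabet [c]
      out ++ [if i < 0 then c
              else (PySem.List.pyGet? rot47Rotated i).getD c])   -- find guarantees i in range
    [])

-- ===== PRECONDITION & SPEC =====
def Spec_rot47_encoder (buffer : String) (out : String) : Prop := out = rot47_encoder_alt buffer
instance (buffer : String) (out : String) : Decidable (Spec_rot47_encoder buffer out) := by unfold Spec_rot47_encoder; infer_instance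

-- ===== CLAIM =====
def Claim_equal_rot47_encoder : Prop := ∀ (buffer : String), Dom_rot47_encoder buffer → Spec_rot47_encoder buffer (rot47_encoder buffer)

-- ===== LEMMAS AND PROOFS =====

-- per-character agreement, for every character code admitted by the domain
set_option maxRecDepth 8000 in
theorem rot47_char_eq_of_lt (n : Nat) (hn : n < 127) :
    (if (33 : Int) ≤ (((Char.ofNat n).toNat : Int)) ∧ (((Char.ofNat n).toNat : Int)) ≤ 126 then
       Char.ofNat (33 + ((((Char.ofNat n).toNat : Int)) + 14) % 94).toNat
     else Char.ofNat n)
    = (let i := PySem.Chars.find rot47Alphabet [Char.ofNat n]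
       if i < 0 then Char.ofNat n
       else (PySem.List.pyGet? rot47Rotated i).getD (Char.ofNat n)) := by
  revert hn
  revert n
  decide

theorem toNat_lt_of_dom (c : Char) (h : pvDomChar c = true) : c.toNat < 127 := by
  simp only [pvDomChar, Bool.or_eq_true, Bool.and_eq_true, decide_eq_true_eq, beq_iff_eq] at h
  omega

theorem rot47_char_eq (c : Char) (h : pvDomChar c = true) :
    (if (33 : Int) ≤ (c.toNat : Int) ∧ (c.toNat : Int) ≤ 126 then
       Char.ofNat (33 + (((c.toNat : Int)) + 14) % 94).toNat
     else c)
    = (let i := PySem.Chars.find rot47Alphabet [c]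
       if i < 0 then c
       else (PySem.List.pyGet? rot47Rotated i).getD c) := by
  have := rot47_char_eq_of_lt c.toNat (toNat_lt_of_dom c h)
  rwa [Char.ofNat_toNat] at this

-- ===== VERDICT =====
set_option maxRecDepth 8000 in
theorem rot47_encoder_spec : Claim_equal_rot47_encoder := by
  intro buffer hdom
  unfold Spec_rot47_encoder rot47_encoder rot47_encoder_alt
  simp only
  rw [PySem.List.foldl_pyRange_zero_pyGetD' buffer.toList ' '
        (f := fun acc c =>
          if (33 : Int) ≤ (c.toNat : Int) ∧ (c.toNat : Int) ≤ 126 then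
            acc ++ [Char.ofNat (33 + (((c.toNat : Int)) + 14) % 94).toNat]
          else acc ++ [c]) (init := [])]
  have hB : (fun (out : List Char) c =>
        let i := PySem.Chars.find rot47Alphabet [c]
        out ++ [if i < 0 then c else (PySem.List.pyGet? rot47Rotated i).getD c])
      = (fun (out : List Char) c =>
        out ++ [let i := PySem.Chars.find rot47Alphabet [c]
                if i < 0 then c else (PySem.List.pyGet? rot47Rotated i).getD c]) := rfl
  have hA : (fun (acc : List Char) c =>
          if (33 : Int) ≤ (c.toNat : Int) ∧ (c.toNat : Int) ≤ 126 then
            acc ++ [Char.ofNat (33 + (((c.toNat : Int)) + 14) % 94).toNat]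
          else acc ++ [c])
        = (fun (acc : List Char) c => acc ++ [if (33 : Int) ≤ (c.toNat : Int) ∧ (c.toNat : Int) ≤ 126 then
            Char.ofNat (33 + (((c.toNat : Int)) + 14) % 94).toNat
          else c]) := by funext acc c; split <;> rfl
  rw [hA, hB, PySem.List.foldl_append_singleton_eq_map, PySem.List.foldl_append_singleton_eq_map]
  simp only [List.nil_append]
  congr 1
  apply List.map_congr_left
  intro c hc
  exact rot47_char_eq c (List.all_eq_true.mp hdom c hc)
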